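-- pv_equiv track=rewrite | github.com/developeryesgames/nuvie-korean | tools/extract_speech_tags.py | extract_text_with_tags
-- ===== SOURCE A (Python) =====
-- def is_print(b):
--     return b == 0x0a or (0x20 <= b <= 0x7e)
--
-- def extract_text_with_tags(data):
--     """바이너리 데이터에서 텍스트와 ~P 태그 추출"""
--     if not data:
--         return []
--
--     results = []
--     text_chars = []
--     pos = 0
--
--     while pos < len(data):
--         b = data[pos]
--
--         # 출력 가능 문자
--         if is_print(b):
--             text_chars.append(chr(b))
--             pos += 1
--         else:
--             # 텍스트 블록 저장
--             if text_chars: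
--                 text = ''.join(text_chars)
--                 if text.strip():
--                     results.append(text)
--                 text_chars = []
--             pos += 1
--
--     # 마지막 텍스트 블록
--     if text_chars:
--         text = ''.join(text_chars)
--         if text.strip():
--             results.append(text)
--
--     return results
-- ===== SOURCE B (Python) =====
-- def is_print(b):
--     return b == 0x0a or (0x20 <= b <= 0x7e)
--
-- def extract_text_with_tags(data):
--     """Group the data into maximal runs of equal printability, then keep the printable runs."""
--     runs = []
--     i, n = 0, len(data)
--     while i < n:
--         j = i + 1
--         while j < n and is_print(data[j]) == is_print(data[i]):
--             j += 1
--         runs.append((is_print(data[i]), data[i:j]))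
--         i = j
--     results = []
--     for printable, group in runs:
--         if printable:
--             text = ''.join(map(chr, group))
--             if text.strip():
--                 results.append(text)
--     return results
-- ===== Notes on version B (the rewrite author's own statement) =====
-- stated objective: alternative
-- what changed: Replaced A's per-byte accumulate/flush state machine (text_chars buffer with mid-loop and end-of-loop flushes) with a two-phase grouping pass: first split the data into maximal runs of equal printability, then map/filter the printable runs.
import Mathlib
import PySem

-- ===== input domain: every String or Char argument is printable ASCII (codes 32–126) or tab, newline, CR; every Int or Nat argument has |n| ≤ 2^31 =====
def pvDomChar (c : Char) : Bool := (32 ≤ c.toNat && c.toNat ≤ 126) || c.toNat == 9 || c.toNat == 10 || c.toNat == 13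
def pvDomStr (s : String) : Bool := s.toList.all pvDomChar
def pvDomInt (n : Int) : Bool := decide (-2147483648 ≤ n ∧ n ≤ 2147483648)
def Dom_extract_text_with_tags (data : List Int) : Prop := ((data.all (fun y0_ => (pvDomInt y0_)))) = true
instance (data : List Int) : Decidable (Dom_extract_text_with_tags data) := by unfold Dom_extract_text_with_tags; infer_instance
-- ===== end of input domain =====

-- B replaces A's per-byte accumulate/flush state machine by a two-phase grouping pass
-- (split into maximal runs of equal printability, then map/filter the printable runs);
-- objective: alternative decomposition, same cost.

-- ===== PORT A =====
def is_print (b : Int) : Bool := b == 0x0a || (0x20 ≤ b && b ≤ 0x7e)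

-- A's while loop over pos, transliterated as structural recursion over the remaining data
-- with the same (results, text_chars) state; the [] case is the final flush after the loop.
def aLoop (results : List String) (text_chars : List Char) : List Int → List String
  | [] =>
      if text_chars ≠ [] then
        let text := String.ofList text_chars
        if PySem.Str.strip text ≠ "" then results ++ [text] else results
      else results
  | b :: rest =>
      if is_print b then
        aLoop results (text_chars ++ [Char.ofNat b.toNat]) rest
      else
        if text_chars ≠ [] then
          let text := String.ofList text_chars
          aLoop (if PySem.Str.strip text ≠ "" then results ++ [text] else results) [] rest
        else
          aLoop results [] rest

def extract_text_with_tags (data : List Int) : List String :=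
  if data = [] then [] else aLoop [] [] data

-- ===== PORT B =====
-- first phase of Source B: split data into maximal runs of equal printability
def groupRuns : List Int → List (Bool × List Int)
  | [] => []
  | x :: xs =>
      let k := is_print x
      (k, x :: xs.takeWhile (fun y => is_print y == k)) ::
        groupRuns (xs.dropWhile (fun y => is_print y == k))
termination_by l => l.length
decreasing_by
  simpa using Nat.lt_succ_of_le (List.length_dropWhile_le _ _)

-- second phase of Source B: the loop body over the runs
def bStep (out : List String) (g : Bool × List Int) : List String :=
  if g.1 then
    let text := String.ofList (g.2.map (fun b => Char.ofNat b.toNat))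
    if PySem.Str.strip text ≠ "" then out ++ [text] else out
  else out

def extract_text_with_tags_alt (data : List Int) : List String :=
  (groupRuns data).foldl bStep []

-- ===== PRECONDITION & SPEC =====
def Spec_extract_text_with_tags (data : List Int) (out : List String) : Prop := out = extract_text_with_tags_alt data
instance (data : List Int) (out : List String) : Decidable (Spec_extract_text_with_tags data out) := by unfold Spec_extract_text_with_tags; infer_instance

-- ===== CLAIM (what is proved, stated in full; the proofs are below) =====
def Claim_equal_extract_text_with_tags : Prop := ∀ (data : List Int), Dom_extract_text_with_tags data → Spec_extract_text_with_tags data (extract_text_with_tags data)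

-- ===== LEMMAS AND PROOFS =====

-- results only ever gets appended to
theorem aLoop_prepend (l : List Int) : ∀ (res : List String) (cur : List Char),
    aLoop res cur l = res ++ aLoop [] cur l := by
  induction l with
  | nil =>
      intro res cur
      simp only [aLoop]
      split_ifs <;> simp
  | cons b rest ih =>
      intro res cur
      simp only [aLoop]
      split_ifs with h1 h2 h3
      · exact ih res _
      · rw [ih (res ++ _), ih ([] ++ _)]; simp
      · exact ih res []
      · exact ih res []

-- the B fold step only appends
theorem bStep_prepend (acc : List String) (g : Bool × List Int) :
    bStep acc g = acc ++ bStep [] g := by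
  simp only [bStep]
  split_ifs <;> simp

theorem foldl_bStep_prepend (gs : List (Bool × List Int)) : ∀ (acc : List String),
    gs.foldl bStep acc = acc ++ gs.foldl bStep [] := by
  induction gs with
  | nil => intro acc; simp
  | cons g gs ih =>
      intro acc
      simp only [List.foldl_cons]
      rw [ih (bStep acc g), ih (bStep [] g), bStep_prepend acc g]
      simp

-- a wholly non-printable prefix is skipped with empty buffer
theorem aLoop_skip (q : List Int) (t : List Int) (hq : ∀ y ∈ q, is_print y = false) :
    aLoop [] [] (q ++ t) = aLoop [] [] t := by
  induction q with
  | nil => rfl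
  | cons y q ih =>
      have hy : is_print y = false := hq y (List.mem_cons_self ..)
      have hstep : aLoop [] [] (y :: (q ++ t)) = aLoop [] [] (q ++ t) := by
        simp [aLoop, hy]
      rw [List.cons_append, hstep]
      exact ih (fun z hz => hq z (List.mem_cons_of_mem _ hz))

-- a wholly printable prefix is absorbed into the buffer
theorem aLoop_absorb (p : List Int) : ∀ (cur : List Char), (∀ y ∈ p, is_print y = true) →
    ∀ t, aLoop [] cur (p ++ t) = aLoop [] (cur ++ p.map (fun b => Char.ofNat b.toNat)) t := by
  induction p with
  | nil => intro cur _ t; simp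
  | cons y p ih =>
      intro cur hp t
      have hy : is_print y = true := hp y (List.mem_cons_self ..)
      simp only [List.cons_append, aLoop, hy, if_true]
      rw [ih (cur ++ [Char.ofNat y.toNat]) (fun z hz => hp z (List.mem_cons_of_mem _ hz)) t]
      simp

-- head of dropWhile fails the predicate
theorem dropWhile_head_false {α : Type} (p : α → Bool) (l : List α) {y : α} {ys : List α}
    (h : l.dropWhile p = y :: ys) : p y = false := by
  induction l with
  | nil => simp at h
  | cons a l ih =>
      by_cases ha : p a
      · rw [List.dropWhile_cons_of_pos ha] at h; exact ih h
      · rw [List.dropWhile_cons_of_neg ha] at h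
        cases h; simpa using ha

-- flushing the buffer against a non-printable-or-empty tail
theorem aLoop_flush (cs : List Char) (t : List Int)
    (ht : t = [] ∨ ∃ y ys, t = y :: ys ∧ is_print y = false) :
    aLoop [] cs t =
      (if cs ≠ [] then
        (if PySem.Str.strip (String.ofList cs) ≠ "" then [String.ofList cs] else [])
       else []) ++ aLoop [] [] t := by
  rcases ht with rfl | ⟨y, ys, rfl, hy⟩
  · have h0 : aLoop [] [] ([] : List Int) = [] := rfl
    rw [h0, List.append_nil]
    simp only [aLoop]
    split_ifs <;> simp
  · have hr : aLoop [] [] (y :: ys) = aLoop [] [] ys := by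
      simp [aLoop, hy]
    by_cases hcs : cs = []
    · subst hcs; simp
    · rw [hr]
      simp only [aLoop, hy, Bool.false_eq_true, if_false, ne_eq, hcs, not_false_eq_true,
        if_true]
      rw [aLoop_prepend ys]
      split_ifs <;> simp

-- main correspondence: A's state machine = B's run-based fold
theorem aLoop_eq_groupRuns (data : List Int) :
    aLoop [] [] data = extract_text_with_tags_alt data := by
  induction data using groupRuns.induct with
  | case1 => simp [extract_text_with_tags_alt, groupRuns, aLoop]
  | case2 x xs k ih =>
      have hkdef : k = is_print x := rfl
      rw [hkdef] at ih
      have hsplit : x :: xs = (x :: xs.takeWhile (fun y => is_print y == is_print x)) ++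
          xs.dropWhile (fun y => is_print y == is_print x) := by
        simp only [List.cons_append]
        rw [List.takeWhile_append_dropWhile]
      have htake : ∀ y ∈ xs.takeWhile (fun y => is_print y == is_print x),
          is_print y = is_print x := by
        intro y hy
        simpa using List.mem_takeWhile_imp hy
      have hdrop : xs.dropWhile (fun y => is_print y == is_print x) = [] ∨
          ∃ y ys, xs.dropWhile (fun y => is_print y == is_print x) = y :: ys ∧
            is_print y ≠ is_print x := by
        cases h : xs.dropWhile (fun y => is_print y == is_print x) with
        | nil => exact Or.inl rfl
        | cons y ys =>
            refine Or.inr ⟨y, ys, rfl, ?_⟩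
            simpa using dropWhile_head_false _ _ h
      unfold extract_text_with_tags_alt
      rw [groupRuns]
      simp only [List.foldl_cons]
      rw [foldl_bStep_prepend]
      rw [← extract_text_with_tags_alt, ← ih]
      by_cases hk : is_print x = true
      · -- printable run
        conv_lhs => rw [hsplit]
        rw [aLoop_absorb _ [] (by
              intro y hy
              rcases List.mem_cons.mp hy with rfl | hy
              · exact hk
              · rw [htake y hy]; exact hk)]
        rw [aLoop_flush _ _ (by
              rcases hdrop with h | ⟨y, ys, h, hy⟩
              · exact Or.inl h
              · exact Or.inr ⟨y, ys, h, by rw [hk] at hy; simpa using hy⟩)]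
        simp [bStep, hk]
      · -- non-printable run
        have hk' : is_print x = false := by simpa using hk
        conv_lhs => rw [hsplit]
        rw [aLoop_skip _ _ (by
              intro y hy
              rcases List.mem_cons.mp hy with rfl | hy
              · exact hk'
              · rw [htake y hy]; exact hk')]
        simp [bStep, hk']

-- ===== VERDICT (by name: the statement is the Claim_ definition above) =====
theorem extract_text_with_tags_spec : Claim_equal_extract_text_with_tags := by
  intro data _
  unfold Spec_extract_text_with_tags extract_text_with_tags
  split_ifs with h
  · subst h; simp [extract_text_with_tags_alt, groupRuns]
  · exact aLoop_eq_groupRuns data
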